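-- pv_equiv track=rewrite | github.com/666Syimyk/gesture-translator | backend/scripts/bootstrap_bukva_alphabet.py | cap_rows_per_class
-- ===== SOURCE A (Python) =====
-- from collections import defaultdict
--
-- def cap_rows_per_class(rows, max_per_class):
--     if max_per_class <= 0:
--         return rows
--
--     grouped = defaultdict(list)
--     for row in rows:
--         grouped[row["text"]].append(row)
--
--     capped = []
--     for label in sorted(grouped):
--         capped.extend(grouped[label][:max_per_class])
--
--     return capped
-- ===== SOURCE B (Python) =====
-- def cap_rows_per_class(rows, max_per_class):
--     if max_per_class <= 0:
--         return rows
--     ordered = sorted(rows, key=lambda r: r["text"])  # stable: ties keep original order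
--     counts = {}
--     capped = []
--     for row in ordered:
--         label = row["text"]
--         c = counts.get(label, 0) + 1
--         counts[label] = c
--         if c <= max_per_class:
--             capped.append(row)
--     return capped
-- ===== Notes on version B (the rewrite author's own statement) =====
-- stated objective: alternative
-- what changed: Instead of grouping rows into a dict of lists and concatenating sorted-label group prefixes, B stably sorts the whole row list by label once and makes a single counting pass that keeps the first max_per_class rows of each label.
import Mathlib
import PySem

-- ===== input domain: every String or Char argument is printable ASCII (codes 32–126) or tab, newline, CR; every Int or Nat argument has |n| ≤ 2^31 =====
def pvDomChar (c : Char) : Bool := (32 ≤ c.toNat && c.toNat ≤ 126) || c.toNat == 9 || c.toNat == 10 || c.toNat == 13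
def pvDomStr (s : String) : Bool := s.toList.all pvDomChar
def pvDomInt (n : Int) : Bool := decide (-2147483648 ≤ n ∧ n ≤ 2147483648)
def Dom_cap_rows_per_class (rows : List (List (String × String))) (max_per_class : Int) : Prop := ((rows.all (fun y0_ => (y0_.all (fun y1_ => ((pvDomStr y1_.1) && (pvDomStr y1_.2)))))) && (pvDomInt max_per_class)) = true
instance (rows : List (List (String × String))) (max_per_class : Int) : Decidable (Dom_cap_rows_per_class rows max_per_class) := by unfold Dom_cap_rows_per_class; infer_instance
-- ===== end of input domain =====

-- B replaces A's group-into-dict-then-concatenate-sorted-label-prefixes with one stable sort of the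
-- rows by label followed by a single counting pass (objective: alternative, same asymptotic cost).


-- row["text"]: first-match association-list lookup; a row without a "text" key raises KeyError
-- in Python (both A and B), which Pre_ excludes — the .getD default is never reached inside Pre_.
def pvRowText (r : List (String × String)) : String :=
  ((r.find? (fun p => p.1 == "text")).getD ("", "")).2

-- ===== PORT A =====
def cap_rows_per_class (rows : List (List (String × String))) (max_per_class : Int) : List (List (String × String)) :=
  if max_per_class ≤ 0 then rows
  else
    -- grouped = defaultdict(list); for row in rows: grouped[row["text"]].append(row)
    let grouped : PySem.Dict String (List (List (String × String))) :=
      rows.foldl (fun d r => d.modify (pvRowText r) [] (fun g => g ++ [r])) PySem.Dict.empty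
    -- capped = []; for label in sorted(grouped): capped.extend(grouped[label][:max_per_class])
    (PySem.List.sorted grouped.keys (fun l => l) false).foldl
      (fun acc l => acc ++ PySem.List.slice (grouped.getD l []) none (some max_per_class)) []

-- ===== PORT B =====
def cap_rows_per_class_alt (rows : List (List (String × String))) (max_per_class : Int) : List (List (String × String)) :=
  if max_per_class ≤ 0 then rows
  else
    -- ordered = sorted(rows, key=lambda r: r["text"])  (stable)
    let ordered := PySem.List.sorted rows (fun r => pvRowText r) false
    -- counts = {}; capped = []; one pass appending while the label's count stays ≤ max_per_class
    (ordered.foldl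
      (fun (st : PySem.Dict String Int × List (List (String × String))) row =>
        let label := pvRowText row
        let c := st.1.getD label 0 + 1
        (st.1.insert label c, if c ≤ max_per_class then st.2 ++ [row] else st.2))
      (PySem.Dict.empty, [])).2

-- ===== PRECONDITION & SPEC =====
-- Pre_ excludes only the inputs where Python A raises KeyError: when max_per_class > 0,
-- every row must carry a "text" key.
def Pre_cap_rows_per_class (rows : List (List (String × String))) (max_per_class : Int) : Prop :=
  max_per_class ≤ 0 ∨ ∀ r ∈ rows, ∃ p ∈ r, p.1 = "text"
instance (rows : List (List (String × String))) (max_per_class : Int) : Decidable (Pre_cap_rows_per_class rows max_per_class) := by unfold Pre_cap_rows_per_class; infer_instance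

def pvWitness_cap_rows_per_class : (List (List (String × String))) × Int :=
  ([[("text", "a"), ("id", "1")], [("text", "b")], [("text", "a"), ("id", "2")]], 1)

def Spec_cap_rows_per_class (rows : List (List (String × String))) (max_per_class : Int) (out : List (List (String × String))) : Prop := out = cap_rows_per_class_alt rows max_per_class
instance (rows : List (List (String × String))) (max_per_class : Int) (out : List (List (String × String))) : Decidable (Spec_cap_rows_per_class rows max_per_class out) := by unfold Spec_cap_rows_per_class; infer_instance

-- ===== CLAIM (what is proved, stated in full; the proofs are below) =====
def Claim_equal_cap_rows_per_class : Prop := ∀ (rows : List (List (String × String))) (max_per_class : Int), Dom_cap_rows_per_class rows max_per_class → Pre_cap_rows_per_class rows max_per_class → Spec_cap_rows_per_class rows max_per_class (cap_rows_per_class rows max_per_class)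

-- ===== LEMMAS AND PROOFS =====

-- flatMap only looks at the function on members
lemma flatMap_congr_mem {α β : Type} (l : List α) (f g : α → List β)
    (h : ∀ a ∈ l, f a = g a) : l.flatMap f = l.flatMap g := by
  induction l with
  | nil => rfl
  | cons a l ih =>
    simp only [List.flatMap_cons, h a (by simp), ih (fun a ha => h a (by simp [ha]))]

lemma insertBy_perm {α : Type} (before : α → α → Bool) (x : α) (ys : List α) :
    (PySem.List.insertBy before x ys).Perm (x :: ys) := by
  induction ys with
  | nil => simp [PySem.List.insertBy]
  | cons y ys ih =>
    simp only [PySem.List.insertBy]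
    split
    · exact List.Perm.refl _
    · exact (ih.cons y).trans (List.Perm.swap x y ys)

lemma insertBy_front {α : Type} (before : α → α → Bool) (x : α) (ys : List α)
    (h : ∀ y ∈ ys, before x y = true) :
    PySem.List.insertBy before x ys = x :: ys := by
  cases ys with
  | nil => rfl
  | cons y ys => simp [PySem.List.insertBy, h y (by simp)]

lemma insertBy_skip {α : Type} (before : α → α → Bool) (x : α) (as bs : List α)
    (h : ∀ a ∈ as, before x a = false) :
    PySem.List.insertBy before x (as ++ bs) = as ++ PySem.List.insertBy before x bs := by
  induction as with
  | nil => rfl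
  | cons a as ih =>
    simp only [List.cons_append, PySem.List.insertBy, h a (by simp)]
    rw [ih (fun a ha => h a (by simp [ha]))]
    simp

lemma insertBy_pairwise_lt (x : String) (ys : List String)
    (h : ys.Pairwise (· < ·)) (hx : x ∉ ys) :
    (PySem.List.insertBy (fun a b => decide (a < b)) x ys).Pairwise (· < ·) := by
  induction ys with
  | nil => simp [PySem.List.insertBy]
  | cons y ys ih =>
    rw [List.pairwise_cons] at h
    simp only [PySem.List.insertBy]
    split
    · rename_i hlt
      refine List.pairwise_cons.mpr ⟨?_, List.pairwise_cons.mpr h⟩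
      intro b hb
      rcases List.mem_cons.mp hb with hb | hb
      · exact hb ▸ of_decide_eq_true hlt
      · exact lt_trans (of_decide_eq_true hlt) (h.1 b hb)
    · rename_i hnlt
      have hnlt' : ¬ x < y := by simpa using hnlt
      refine List.pairwise_cons.mpr ⟨?_, ih h.2 (fun hm => hx (List.mem_cons_of_mem y hm))⟩
      intro b hb
      rcases (PySem.List.mem_insertBy _ x b ys).mp hb with hb | hb
      · subst hb
        exact lt_of_le_of_ne (not_lt.mp hnlt')
          (Ne.symm (fun he => hx (he ▸ List.mem_cons_self)))
      · exact h.1 b hb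

-- the core insertion lemma: inserting a row into a label-grouped concatenation
lemma insertBy_flatMap (labels : List String)
    (g : String → List (List (String × String))) (r : List (String × String))
    (hlab : labels.Pairwise (· < ·))
    (hg : ∀ l, ∀ x ∈ g l, pvRowText x = l)
    (hempty : pvRowText r ∉ labels → g (pvRowText r) = []) :
    PySem.List.insertBy (fun a b => decide (pvRowText a < pvRowText b)) r (labels.flatMap g)
      = (if pvRowText r ∈ labels then labels
         else PySem.List.insertBy (fun a b => decide (a < b)) (pvRowText r) labels).flatMap
          (fun l => if l = pvRowText r then g l ++ [r] else g l) := by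
  induction labels with
  | nil =>
    have he := hempty (by simp)
    simp [PySem.List.insertBy, he]
  | cons l labels ih =>
    rw [List.pairwise_cons] at hlab
    rcases lt_trichotomy (pvRowText r) l with hlt | heq | hgt
    · -- r's label is smaller than every label: r goes to the front, a fresh first group
      have hnotmem : pvRowText r ∉ l :: labels := by
        intro hm
        rcases List.mem_cons.mp hm with hm | hm
        · exact absurd hlt (hm ▸ lt_irrefl l)
        · exact absurd (lt_trans hlt (hlab.1 _ hm)) (lt_irrefl _)
      have hall : ∀ y ∈ (l :: labels).flatMap g,
          (fun a b => decide (pvRowText a < pvRowText b)) r y = true := by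
        intro y hy
        rcases List.mem_flatMap.mp hy with ⟨l', hl', hy'⟩
        have hk := hg l' y hy'
        rcases List.mem_cons.mp hl' with hl' | hl'
        · simpa [hk, hl'] using hlt
        · simpa [hk] using lt_trans hlt (hlab.1 _ hl')
      rw [insertBy_front _ _ _ hall, if_neg hnotmem]
      have hins : PySem.List.insertBy (fun a b => decide (a < b)) (pvRowText r) (l :: labels)
          = pvRowText r :: l :: labels := by
        simp [PySem.List.insertBy, hlt]
      rw [hins]
      simp only [List.flatMap_cons, hempty hnotmem, List.nil_append]
      have h1 : (if l = pvRowText r then g l ++ [r] else g l) = g l :=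
        if_neg (ne_of_gt hlt)
      rw [h1, flatMap_congr_mem labels _ g (fun l' hl' =>
        if_neg (ne_of_gt (lt_trans hlt (hlab.1 _ hl'))))]
      simp
    · -- r's label is exactly l: r is appended at the end of the first group
      have hmem : pvRowText r ∈ l :: labels := by simp [heq]
      rw [if_pos hmem]
      simp only [List.flatMap_cons]
      rw [insertBy_skip _ _ _ _ (by
        intro a ha
        simp [hg l a ha, heq])]
      rw [insertBy_front _ _ _ (by
        intro y hy
        rcases List.mem_flatMap.mp hy with ⟨l', hl', hy'⟩
        rw [hg l' y hy']
        exact decide_eq_true (heq ▸ hlab.1 _ hl'))]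
      have h1 : (if l = pvRowText r then g l ++ [r] else g l) = g l ++ [r] := if_pos heq.symm
      rw [h1, flatMap_congr_mem labels _ g (fun l' hl' =>
        if_neg (ne_of_gt (heq ▸ hlab.1 _ hl')))]
      simp
    · -- r's label is larger than l: skip the first group and recurse
      simp only [List.flatMap_cons]
      rw [insertBy_skip _ _ _ _ (by
        intro a ha
        rw [hg l a ha]
        exact decide_eq_false (not_lt.mpr (le_of_lt hgt)))]
      rw [ih hlab.2 (fun hm => hempty (by
        simp only [List.mem_cons, not_or]
        exact ⟨fun he => absurd (he ▸ hgt) (lt_irrefl _), hm⟩))]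
      have h1 : (if l = pvRowText r then g l ++ [r] else g l) = g l :=
        if_neg (ne_of_lt hgt)
      by_cases hm : pvRowText r ∈ labels
      · rw [if_pos hm, if_pos (List.mem_cons_of_mem l hm)]
        simp only [List.flatMap_cons, h1]
      · rw [if_neg hm, if_neg (by
          simp only [List.mem_cons, not_or]
          exact ⟨fun he => absurd (he ▸ hgt) (lt_irrefl _), hm⟩)]
        have hins : PySem.List.insertBy (fun a b => decide (a < b)) (pvRowText r) (l :: labels)
            = l :: PySem.List.insertBy (fun a b => decide (a < b)) (pvRowText r) labels := by
          simp [PySem.List.insertBy, not_lt.mpr (le_of_lt hgt)]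
        rw [hins]
        simp only [List.flatMap_cons, h1]

-- stable sort by label = concatenation, over the sorted distinct labels, of the per-label sublists
lemma sorted_flatMap (rs : List (List (String × String))) :
    PySem.List.sorted rs (fun r => pvRowText r) false
      = (PySem.List.sorted (PySem.Set.ofList (rs.map pvRowText)) (fun l => l) false).flatMap
          (fun l => rs.filter (fun x => pvRowText x == l)) := by
  induction rs using List.reverseRecOn with
  | nil => rfl
  | append_singleton rs r ih =>
    have hL : PySem.List.sorted (rs ++ [r]) (fun r => pvRowText r) false
        = PySem.List.insertBy (fun a b => decide (pvRowText a < pvRowText b)) r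
            (PySem.List.sorted rs (fun r => pvRowText r) false) := by
      rw [PySem.List.sorted_eq_foldl_insertBy, PySem.List.sorted_eq_foldl_insertBy,
        List.foldl_append]
      rfl
    have hlab := PySem.List.sorted_ofList_pairwise_lt (rs.map pvRowText)
    rw [hL, ih, insertBy_flatMap _ _ r hlab
      (fun l x hx => by simpa using (List.mem_filter.mp hx).2)
      (fun hnm => by
        rw [List.filter_eq_nil_iff]
        intro x hx hbeq
        exact hnm ((PySem.List.mem_sorted _ _ _ _).mpr
          ((PySem.Set.mem_ofList _ _).mpr
            (List.mem_map.mpr ⟨x, hx, by simpa using hbeq⟩))))]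
    have hfun : (fun l => if l = pvRowText r
          then rs.filter (fun x => pvRowText x == l) ++ [r]
          else rs.filter (fun x => pvRowText x == l))
        = fun l => (rs ++ [r]).filter (fun x => pvRowText x == l) := by
      funext l
      rw [List.filter_append]
      by_cases he : l = pvRowText r
      · simp [he]
      · simp [he, Ne.symm he]
    rw [hfun]
    have hmapr : (rs ++ [r]).map pvRowText = rs.map pvRowText ++ [pvRowText r] := by
      simp
    have hadd : PySem.Set.ofList (rs.map pvRowText ++ [pvRowText r])
        = PySem.Set.add (PySem.Set.ofList (rs.map pvRowText)) (pvRowText r) := by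
      simp [PySem.Set.ofList, List.foldl_append]
    by_cases hm : pvRowText r ∈ PySem.List.sorted (PySem.Set.ofList (rs.map pvRowText)) (fun l => l) false
    · have hm' : pvRowText r ∈ PySem.Set.ofList (rs.map pvRowText) :=
        (PySem.List.mem_sorted _ _ _ _).mp hm
      rw [if_pos hm, hmapr, hadd]
      have : PySem.Set.add (PySem.Set.ofList (rs.map pvRowText)) (pvRowText r)
          = PySem.Set.ofList (rs.map pvRowText) := by
        have hm2 := (PySem.Set.mem_ofList _ _).mp hm'
        simp only [PySem.Set.add]
        rw [if_pos (by simpa using hm2)]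
      rw [this]
    · have hm' : pvRowText r ∉ PySem.Set.ofList (rs.map pvRowText) :=
        fun h => hm ((PySem.List.mem_sorted _ _ _ _).mpr h)
      rw [if_neg hm, hmapr, hadd]
      have hm2 : pvRowText r ∉ rs.map pvRowText :=
        fun h => hm' ((PySem.Set.mem_ofList _ _).mpr h)
      have : PySem.Set.add (PySem.Set.ofList (rs.map pvRowText)) (pvRowText r)
          = PySem.Set.ofList (rs.map pvRowText) ++ [pvRowText r] := by
        simp only [PySem.Set.add]
        rw [if_neg (by simpa using hm2)]
      rw [this]
      have hperm : (PySem.List.insertBy (fun a b => decide (a < b)) (pvRowText r)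
            (PySem.List.sorted (PySem.Set.ofList (rs.map pvRowText)) (fun l => l) false)).Perm
          (PySem.Set.ofList (rs.map pvRowText) ++ [pvRowText r]) :=
        (insertBy_perm _ _ _).trans
          (((PySem.List.sorted_perm _ _ _).cons (pvRowText r)).trans
            (List.perm_append_singleton _ _).symm)
      rw [← PySem.List.sorted_eq_of_perm_of_pairwise_lt _ _ (fun a => a) hperm
        (insertBy_pairwise_lt _ _ hlab hm)]

-- one uniform-label group through B's counting fold
lemma fold_group (m : Int) (l : String) (xs : List (List (String × String)))
    (h : ∀ x ∈ xs, pvRowText x = l) (d : PySem.Dict String Int)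
    (out : List (List (String × String))) :
    ∃ d', xs.foldl
        (fun st row =>
          (st.1.insert (pvRowText row) (st.1.getD (pvRowText row) 0 + 1),
           if st.1.getD (pvRowText row) 0 + 1 ≤ m then st.2 ++ [row] else st.2))
        (d, out)
      = (d', out ++ xs.take ((m - d.getD l 0).toNat))
      ∧ ∀ l', l' ≠ l → d'.getD l' 0 = d.getD l' 0 := by
  induction xs generalizing d out with
  | nil => exact ⟨d, by simp, fun _ _ => rfl⟩
  | cons x xs ih =>
    have hx : pvRowText x = l := h x List.mem_cons_self
    simp only [List.foldl_cons, hx]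
    obtain ⟨d', heq, hoth⟩ := ih (fun y hy => h y (List.mem_cons_of_mem x hy))
      (d.insert l (d.getD l 0 + 1))
      (if d.getD l 0 + 1 ≤ m then out ++ [x] else out)
    refine ⟨d', ?_, fun l' hl' => (hoth l' hl').trans
      (PySem.Dict.getD_insert_of_ne d _ _ hl')⟩
    rw [heq, PySem.Dict.getD_insert_self]
    by_cases hc : d.getD l 0 + 1 ≤ m
    · have h1 : (m - d.getD l 0).toNat = (m - (d.getD l 0 + 1)).toNat + 1 := by omega
      rw [if_pos hc, h1, List.take_succ_cons, List.append_assoc]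
      rfl
    · have h1 : (m - d.getD l 0).toNat = 0 := by omega
      have h2 : (m - (d.getD l 0 + 1)).toNat = 0 := by omega
      rw [if_neg hc, h1, h2]
      simp

-- the whole counting fold over a label-grouped concatenation
lemma fold_flatMap (m : Int) (labels : List String)
    (g : String → List (List (String × String)))
    (hnd : labels.Nodup)
    (hg : ∀ l ∈ labels, ∀ x ∈ g l, pvRowText x = l)
    (d : PySem.Dict String Int) (out : List (List (String × String)))
    (hd : ∀ l ∈ labels, d.getD l 0 = 0) :
    ((labels.flatMap g).foldl
        (fun st row =>
          (st.1.insert (pvRowText row) (st.1.getD (pvRowText row) 0 + 1),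
           if st.1.getD (pvRowText row) 0 + 1 ≤ m then st.2 ++ [row] else st.2))
        (d, out)).2
      = out ++ labels.flatMap (fun l => (g l).take m.toNat) := by
  induction labels generalizing d out with
  | nil => simp
  | cons l labels ih =>
    simp only [List.flatMap_cons, List.foldl_append]
    obtain ⟨d', heq, hoth⟩ := fold_group m l (g l) (hg l List.mem_cons_self) d out
    rw [heq]
    have h0 : d.getD l 0 = 0 := hd l List.mem_cons_self
    have ht : (m - d.getD l 0).toNat = m.toNat := by omega
    rw [ht, ih (List.nodup_cons.mp hnd).2
      (fun l' hl' => hg l' (List.mem_cons_of_mem l hl'))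
      d' (out ++ (g l).take m.toNat)
      (fun l' hl' => (hoth l' (fun he => (List.nodup_cons.mp hnd).1 (he ▸ hl'))).trans
        (hd l' (List.mem_cons_of_mem l hl'))),
      List.append_assoc]

-- ===== VERDICT (by name: the statement is the Claim_ definition above) =====
theorem cap_rows_per_class_spec : Claim_equal_cap_rows_per_class := by
  intro rows m _ _
  unfold Spec_cap_rows_per_class cap_rows_per_class cap_rows_per_class_alt
  by_cases hm : m ≤ 0
  · simp [hm]
  · rw [if_neg hm, if_neg hm]
    have hm' : (0 : Int) ≤ m := le_of_lt (not_le.mp hm)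
    -- A's grouped dict, characterised
    have hget : ∀ c, (rows.foldl
          (fun d r => d.modify (pvRowText r) [] (fun g => g ++ [r])) PySem.Dict.empty).getD c []
        = rows.filter (fun r => pvRowText r == c) := by
      intro c
      rw [show rows.foldl (fun d r => d.modify (pvRowText r) [] (fun g => g ++ [r]))
            PySem.Dict.empty
          = (rows.map (fun r => (pvRowText r, r))).foldl
              (fun d p => d.modify p.1 [] (fun g => g ++ [p.2])) PySem.Dict.empty from
        List.foldl_map.symm ▸ rfl]
      rw [PySem.Dict.getD_foldl_modify_append]
      simp [List.filter_map, Function.comp_def]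
    have hkeys : (rows.foldl
          (fun d r => d.modify (pvRowText r) [] (fun g => g ++ [r])) PySem.Dict.empty).keys
        = PySem.Set.ofList (rows.map pvRowText) := by
      rw [PySem.Dict.keys_foldl_modify_key rows pvRowText [] (fun _ r g => g ++ [r])
        PySem.Dict.empty]
      rfl
    dsimp only
    rw [hkeys, PySem.List.foldl_append_eq_flatMap, List.nil_append]
    -- B's side: stable sort then counting pass
    rw [sorted_flatMap rows]
    rw [fold_flatMap m _ _
      ((PySem.List.sorted_ofList_pairwise_lt (rows.map pvRowText)).imp ne_of_lt)
      (fun l _ x hx => by simpa using (List.mem_filter.mp hx).2)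
      PySem.Dict.empty []
      (fun l _ => PySem.Dict.getD_empty l 0)]
    rw [List.nil_append]
    refine flatMap_congr_mem _ _ _ (fun l _ => ?_)
    rw [hget l, PySem.List.slice_to _ hm']
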